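-- pv_equiv track=rewrite | github.com/Selifanchik/Tareas | mystery.py | mystery_inv
-- ===== SOURCE A (Python) =====
-- def route_cut(fl, start_cut, end_cut):
--     if fl == 'start':
--         start_cut += ((end_cut - start_cut) // 2)
--     else:
--         end_cut -= ((end_cut - start_cut) // 2)
--     return start_cut, end_cut
--
-- def binary(n):
--     item = n
--     string_item = ''
--     while item > 0:
--         string_item = str(item % 2) + string_item
--         item //= 2
--     return string_item
--
-- def mystery_inv(n):
--     if n > 0:
--         route = {'start': 'end', 'end': 'start'}
--         start_n = 0
--         end_n = 2**(len(binary(n))) - 1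
--         flagg = 'end'
--         for elem in binary(n):
--             if elem == '1':
--                 flagg = route[flagg]
--             start_n, end_n = route_cut(flagg, start_n, end_n)
--         return end_n
--     else:
--         return 0
-- ===== SOURCE B (Python) =====
-- def mystery_inv(n):
--     if n <= 0:
--         return 0
--     b = 0
--     while n:
--         b ^= n
--         n >>= 1
--     return b
-- ===== Notes on version B (the rewrite author's own statement) =====
-- stated objective: simpler
-- what changed: Replaces the interval-halving simulation (building n's binary string, a start/end pair cut each step under a dict-driven flag) with the standard Gray-code decode: XOR together all right-shifts of n.
import Mathlib
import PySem

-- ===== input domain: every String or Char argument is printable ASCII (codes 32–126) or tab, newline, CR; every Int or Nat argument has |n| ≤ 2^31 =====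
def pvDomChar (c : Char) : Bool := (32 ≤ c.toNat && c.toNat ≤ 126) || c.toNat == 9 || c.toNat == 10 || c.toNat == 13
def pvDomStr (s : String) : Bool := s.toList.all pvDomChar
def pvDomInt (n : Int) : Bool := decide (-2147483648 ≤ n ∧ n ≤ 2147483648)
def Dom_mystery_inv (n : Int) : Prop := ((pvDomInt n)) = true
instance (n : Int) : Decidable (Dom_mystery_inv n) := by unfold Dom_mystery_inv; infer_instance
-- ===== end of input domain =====

-- B replaces A's interval-halving simulation (binary string + dict-driven start/end cuts)
-- with the standard Gray-code decode (XOR of all right-shifts of n); objective: simpler.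

-- ===== PORT A =====
def route : PySem.Dict String String := PySem.Dict.ofList [("start", "end"), ("end", "start")]

def route_cut (fl : String) (start_cut end_cut : Int) : Int × Int :=
  if fl == "start" then (start_cut + PySem.Int.floordiv (end_cut - start_cut) 2, end_cut)
  else (start_cut, end_cut - PySem.Int.floordiv (end_cut - start_cut) 2)

-- while item > 0: string_item = str(item % 2) + string_item; item //= 2
def binaryAux (item : Int) (string_item : String) : String :=
  if 0 < item then
    binaryAux (PySem.Int.floordiv item 2) (PySem.Int.toStr (PySem.Int.mod item 2) ++ string_item)
  else string_item
termination_by item.toNat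
decreasing_by
  rename_i h
  rw [PySem.Int.floordiv_eq_ediv_of_pos (by omega : (0:Int) < 2)]
  omega

def binary (n : Int) : String := binaryAux n ""

-- loop body of 'for elem in binary(n)'; route[flagg]: the key is always present
-- ("start"/"end"), so the KeyError branch is unreachable; .getD keeps it total.
def mysteryStep (st : String × Int × Int) (elem : Char) : String × Int × Int :=
  let flagg := if elem == '1' then (PySem.Dict.get? route st.1).getD st.1 else st.1
  let p := route_cut flagg st.2.1 st.2.2
  (flagg, p.1, p.2)

def mystery_inv (n : Int) : Int :=
  if 0 < n then
    let start_n : Int := 0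
    let end_n : Int := 2 ^ (PySem.Str.len (binary n)).toNat - 1
    let r := (binary n).toList.foldl mysteryStep ("end", start_n, end_n)
    r.2.2
  else 0

-- ===== PORT B =====
-- b = 0; while n: b ^= n; n >>= 1   (only reached with n > 0, so carried out in Nat)
def altLoop (b m : Nat) : Nat :=
  if m ≠ 0 then altLoop (b ^^^ m) (m / 2) else b
termination_by m
decreasing_by exact Nat.div_lt_self (by omega) (by omega)

def mystery_inv_alt (n : Int) : Int :=
  if n ≤ 0 then 0
  else (altLoop 0 n.toNat : Int)

-- ===== PRECONDITION & SPEC =====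
def Spec_mystery_inv (n : Int) (out : Int) : Prop := out = mystery_inv_alt n
instance (n : Int) (out : Int) : Decidable (Spec_mystery_inv n out) := by unfold Spec_mystery_inv; infer_instance

-- ===== CLAIM (what is proved, stated in full; the proofs are below) =====
def Claim_equal_mystery_inv : Prop := ∀ (n : Int), Dom_mystery_inv n → Spec_mystery_inv n (mystery_inv n)

-- ===== LEMMAS AND PROOFS =====

-- reference function: Gray-code decode, LSB recursion
def gd (m : Nat) : Nat :=
  if _h : m = 0 then 0 else 2 * gd (m / 2) + (m + gd (m / 2)) % 2
termination_by m
decreasing_by exact Nat.div_lt_self (by omega) (by omega)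

-- the character list binary(m) produces (MSB first)
def blC (m : Nat) : List Char :=
  if _h : m = 0 then [] else blC (m / 2) ++ [if m % 2 = 1 then '1' else '0']
termination_by m
decreasing_by exact Nat.div_lt_self (by omega) (by omega)

-- running parity of '1' characters
def parityC : List Char → Bool
  | [] => false
  | c :: t => xor (c == '1') (parityC t)

-- MSB-first prefix-xor decode of a bit string, parity seeded by f
def decodeG (f : Bool) : List Char → Nat
  | [] => 0
  | c :: t => (if xor f (c == '1') then 2 ^ t.length else 0) + decodeG (xor f (c == '1')) t

def flagStr (f : Bool) : String := if f then "start" else "end"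

theorem binaryAux_eq (m : Nat) : ∀ acc : String,
    (binaryAux (m : Int) acc).toList = blC m ++ acc.toList := by
  induction m using Nat.strong_induction_on with
  | _ m ih =>
    intro acc
    by_cases hm : m = 0
    · subst hm; rw [binaryAux, if_neg (by norm_num), blC]; simp
    · rw [binaryAux, if_pos (by exact_mod_cast Nat.pos_of_ne_zero hm)]
      have hdiv : PySem.Int.floordiv (m : Int) 2 = ((m / 2 : Nat) : Int) := by
        exact_mod_cast PySem.Int.floordiv_natCast m 2
      have hmod : PySem.Int.mod (m : Int) 2 = ((m % 2 : Nat) : Int) := by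
        exact_mod_cast PySem.Int.mod_natCast m 2
      rw [hdiv, hmod, ih _ (Nat.div_lt_self (by omega) (by omega))]
      conv_rhs => rw [blC, dif_neg hm]
      have t0 : PySem.Int.toChars 0 = ['0'] := by decide
      have t1 : PySem.Int.toChars 1 = ['1'] := by decide
      have h3 : m % 2 = 0 ∨ m % 2 = 1 := by omega
      rcases h3 with h | h <;> rw [h] <;>
        simp [String.toList_append, t0, t1, List.append_assoc]

theorem step_flag (f : Bool) (c : Char) :
    (if c == '1' then (PySem.Dict.get? route (flagStr f)).getD (flagStr f) else flagStr f)
      = flagStr (xor f (c == '1')) := by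
  rcases (c == '1').eq_false_or_eq_true with h | h <;> rw [h] <;> cases f <;>
    simp [flagStr] <;> decide

theorem foldl_step_tail (l : List Char) : ∀ (f : Bool) (s : Int),
    ((l.foldl mysteryStep (flagStr f, s, s + 2 ^ l.length)).2.2 : Int)
      = s + (decodeG f l : Int) + 1 := by
  induction l with
  | nil => intro f s; simp [decodeG]
  | cons c t ih =>
    intro f s
    have hfd : PySem.Int.floordiv (s + (2:Int) ^ (t.length + 1) - s) 2 = 2 ^ t.length := by
      rw [PySem.Int.floordiv_eq_ediv_of_pos (by omega)]
      have : s + (2:Int) ^ (t.length + 1) - s = 2 ^ t.length * 2 := by rw [pow_succ]; ring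
      rw [this]; exact Int.mul_ediv_cancel _ (by omega)
    rw [List.foldl_cons]
    have hstep : mysteryStep (flagStr f, s, s + 2 ^ (c :: t).length) c
        = (flagStr (xor f (c == '1')),
           if xor f (c == '1') then s + 2 ^ t.length else s,
           if xor f (c == '1') then (s + 2 ^ t.length) + 2 ^ t.length
             else s + 2 ^ t.length) := by
      simp only [mysteryStep, step_flag, route_cut, List.length_cons, hfd]
      rcases (xor f (c == '1')).eq_false_or_eq_true with h | h <;>
        rw [h] <;> simp [flagStr, pow_succ] <;> ring
    rcases (xor f (c == '1')).eq_false_or_eq_true with h | h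
    · rw [hstep, h]
      simp only [if_true]
      rw [ih true (s + 2 ^ t.length), show decodeG f (c :: t)
          = 2 ^ t.length + decodeG true t from by simp only [decodeG, h]; simp]
      push_cast
      ring
    · rw [hstep, h]
      simp only [Bool.false_eq_true, if_false]
      rw [ih false s, show decodeG f (c :: t) = decodeG false t from by
        simp only [decodeG, h]; simp]

theorem blC_head (m : Nat) (hm : 0 < m) : ∃ t, blC m = '1' :: t := by
  induction m using Nat.strong_induction_on with
  | _ m ih =>
    rw [blC, dif_neg (by omega)]
    by_cases h2 : m / 2 = 0
    · rw [blC, dif_pos h2]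
      have : m % 2 = 1 := by omega
      simp [this]
    · obtain ⟨t, ht⟩ := ih (m / 2) (Nat.div_lt_self (by omega) (by omega)) (by omega)
      exact ⟨t ++ [if m % 2 = 1 then '1' else '0'], by rw [ht]; simp⟩

theorem mystery_inv_pos (m : Nat) (hm : 0 < m) :
    mystery_inv (m : Int) = (decodeG false (blC m) : Int) := by
  have h0 : (0:Int) < (m : Int) := by exact_mod_cast hm
  rw [show mystery_inv (m : Int) = ((binary (m : Int)).toList.foldl mysteryStep
      ("end", 0, 2 ^ (PySem.Str.len (binary (m : Int))).toNat - 1)).2.2 from by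
    rw [mystery_inv, if_pos h0]]
  have hb : (binary (m : Int)).toList = blC m := by
    simpa using binaryAux_eq m ""
  have hlen : (PySem.Str.len (binary (m : Int))).toNat = (blC m).length := by
    rw [PySem.Str.len_eq, hb]; simp
  obtain ⟨t, ht⟩ := blC_head m hm
  have hpos : (0:Int) < 2 ^ t.length := pow_pos (by omega) _
  rw [hb, hlen, ht]
  rw [List.foldl_cons]
  have hfd : PySem.Int.floordiv ((2:Int) ^ (t.length + 1) - 1 - 0) 2 = 2 ^ t.length - 1 := by
    rw [PySem.Int.floordiv_eq_ediv_of_pos (by omega)]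
    have : (2:Int) ^ (t.length + 1) - 1 - 0 = (2 ^ t.length - 1) * 2 + 1 := by
      rw [pow_succ]; ring
    rw [this]; omega
  have hstep : mysteryStep ("end", 0, 2 ^ ('1' :: t).length - 1) '1'
      = (flagStr true, 2 ^ t.length - 1, (2 ^ t.length - 1) + 2 ^ t.length) := by
    have e1 : ('1' == '1') = true := by decide
    have e2 : ("start" == "start") = true := by decide
    have hroute : ((PySem.Dict.get? route "end").getD "end") = "start" := by decide
    simp only [mysteryStep, route_cut, List.length_cons, e1, hroute, e2,
      if_true, flagStr, hfd]
    simp only [Prod.mk.injEq]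
    exact ⟨trivial, by ring, by rw [pow_succ]; ring⟩
  rw [hstep, foldl_step_tail t true (2 ^ t.length - 1)]
  have : decodeG false ('1' :: t) = 2 ^ t.length + decodeG true t := by
    simp [decodeG]
  rw [this]
  push_cast
  ring

theorem parityC_append (l : List Char) (c : Char) :
    parityC (l ++ [c]) = xor (parityC l) (c == '1') := by
  induction l with
  | nil => simp [parityC]
  | cons a t ih => simp [parityC, ih]

theorem decodeG_append (l : List Char) : ∀ (f : Bool) (c : Char),
    decodeG f (l ++ [c])
      = 2 * decodeG f l + (if xor (xor f (parityC l)) (c == '1') then 1 else 0) := by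
  induction l with
  | nil => intro f c; rcases (xor f (c == '1')).eq_false_or_eq_true with h | h <;>
      simp [decodeG, parityC, h]
  | cons a t ih =>
    intro f c
    simp only [List.cons_append, decodeG, ih, List.length_append,
      List.length_cons, List.length_nil, pow_succ, parityC]
    simp only [Bool.xor_assoc]
    split_ifs <;> ring

theorem parityC_blC (m : Nat) : parityC (blC m) = decide (gd m % 2 = 1) := by
  induction m using Nat.strong_induction_on with
  | _ m ih =>
    by_cases hm : m = 0
    · subst hm; simp [blC, parityC, gd]
    · rw [blC, dif_neg hm, parityC_append, ih _ (Nat.div_lt_self (by omega) (by omega))]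
      have hgd : gd m = 2 * gd (m / 2) + (m + gd (m / 2)) % 2 := by rw [gd]; simp [hm]
      have h1 : gd m % 2 = (m + gd (m / 2)) % 2 := by omega
      have h2 : gd (m / 2) % 2 = 0 ∨ gd (m / 2) % 2 = 1 := by omega
      have h3 : m % 2 = 0 ∨ m % 2 = 1 := by omega
      have h4 : (m + gd (m / 2)) % 2 = (m % 2 + gd (m / 2) % 2) % 2 := by omega
      rcases h2 with hp | hp <;> rcases h3 with hq | hq <;> simp [hp, hq, h1, h4]

theorem decodeG_blC (m : Nat) : decodeG false (blC m) = gd m := by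
  induction m using Nat.strong_induction_on with
  | _ m ih =>
    by_cases hm : m = 0
    · subst hm; simp [blC, decodeG, gd]
    · rw [blC, dif_neg hm, decodeG_append, ih _ (Nat.div_lt_self (by omega) (by omega)),
        parityC_blC]
      have hgd : gd m = 2 * gd (m / 2) + (m + gd (m / 2)) % 2 := by rw [gd]; simp [hm]
      have h4 : (m + gd (m / 2)) % 2 = (m % 2 + gd (m / 2) % 2) % 2 := by omega
      have h2 : gd (m / 2) % 2 = 0 ∨ gd (m / 2) % 2 = 1 := by omega
      have h3 : m % 2 = 0 ∨ m % 2 = 1 := by omega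
      rcases h2 with hp | hp <;> rcases h3 with hq | hq <;> simp [hp, hq] <;> omega

theorem xor_decomp (a b : Nat) : a ^^^ b = 2 * (a / 2 ^^^ b / 2) + (a + b) % 2 := by
  conv_lhs => rw [← Nat.div_add_mod (a ^^^ b) 2]
  rw [Nat.xor_div_two, Nat.xor_mod_two_eq]

theorem xor_gd_div_two (k : Nat) : k ^^^ gd k / 2 = gd k := by
  induction k using Nat.strong_induction_on with
  | _ k ih =>
    by_cases hk : k = 0
    · subst hk; simp [gd]
    · have hgd : gd k = 2 * gd (k / 2) + (k + gd (k / 2)) % 2 := by rw [gd]; simp [hk]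
      have hdiv : gd k / 2 = gd (k / 2) := by omega
      rw [hdiv, xor_decomp, ih _ (Nat.div_lt_self (by omega) (by omega)), hgd]

theorem gd_rec_xor (m : Nat) (hm : 0 < m) : gd m = m ^^^ gd (m / 2) := by
  rw [xor_decomp, xor_gd_div_two (m / 2)]
  rw [gd]; simp [Nat.pos_iff_ne_zero.mp hm]

theorem altLoop_eq (m : Nat) : ∀ b : Nat, altLoop b m = b ^^^ gd m := by
  induction m using Nat.strong_induction_on with
  | _ m ih =>
    intro b
    by_cases hm : m = 0
    · subst hm; rw [altLoop]; simp [gd]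
    · rw [altLoop, if_pos hm, ih _ (Nat.div_lt_self (by omega) (by omega)),
        Nat.xor_assoc, ← gd_rec_xor m (by omega)]

-- ===== VERDICT (by name: the statement is the Claim_ definition above) =====
theorem mystery_inv_spec : Claim_equal_mystery_inv := by
  intro n _
  unfold Spec_mystery_inv mystery_inv_alt
  by_cases hn : 0 < n
  · have hm : 0 < n.toNat := by omega
    have hcast : ((n.toNat : Nat) : Int) = n := by omega
    rw [if_neg (by omega)]
    calc mystery_inv n = mystery_inv (n.toNat : Int) := by rw [hcast]
      _ = (decodeG false (blC n.toNat) : Int) := mystery_inv_pos _ hm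
      _ = (gd n.toNat : Int) := by rw [decodeG_blC]
      _ = (altLoop 0 n.toNat : Int) := by rw [altLoop_eq, Nat.zero_xor]
  · rw [if_pos (by omega)]
    unfold mystery_inv
    rw [if_neg hn]
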